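-- pv_equiv track=rewrite | github.com/jacobwarren/saplings | src/saplings/gasa/_internal/packing/block_diagonal_packer.py | _create_reordering
-- ===== SOURCE A (Python) =====
-- def _create_reordering(
--
--     chunk_groups: list[list[int]],
--     seq_len: int,
-- ) -> list[int]:
--     """
--     Create a reordering based on chunk groups.
--
--     Args:
--     ----
--         chunk_groups: Groups of token positions
--         seq_len: Sequence length
--
--     Returns:
--     -------
--         List[int]: Reordering (list of original positions in new order)
--
--     """
--     # Flatten groups - this gives us the new token order
--     # (original position -> new position in the reordered sequence)
--     reordering = []
--     for group in chunk_groups: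
--         reordering.extend(group)
--
--     # Add any positions that weren't mapped to chunks
--     unmapped = set(range(seq_len)) - set(reordering)
--     reordering.extend(sorted(unmapped))
--
--     return reordering
-- ===== SOURCE B (Python) =====
-- def _create_reordering(
--     chunk_groups: list[list[int]],
--     seq_len: int,
-- ) -> list[int]:
--     # Gap enumeration: sort the distinct in-range mapped positions, then emit the
--     # unmapped tail as whole ranges between consecutive mapped positions --
--     # no membership test per candidate position and no full-range set.
--     reordering = []
--     for group in chunk_groups:
--         reordering.extend(group)
--     hits = sorted({p for p in reordering if 0 <= p < seq_len})
--     prev = 0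
--     for h in hits:
--         reordering.extend(range(prev, h))
--         prev = h + 1
--     reordering.extend(range(prev, seq_len))
--     return reordering
-- ===== Notes on version B (the rewrite author's own statement) =====
-- stated objective: alternative
-- what changed: Instead of A's set difference against set(range(seq_len)) followed by sorting the unmapped positions, B sorts only the distinct in-range mapped positions and emits the unmapped tail by gap enumeration: for each consecutive pair of mapped positions it extends the result with the whole range between them, so no per-position membership test and no set over the full range is ever built.
import Mathlib
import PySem

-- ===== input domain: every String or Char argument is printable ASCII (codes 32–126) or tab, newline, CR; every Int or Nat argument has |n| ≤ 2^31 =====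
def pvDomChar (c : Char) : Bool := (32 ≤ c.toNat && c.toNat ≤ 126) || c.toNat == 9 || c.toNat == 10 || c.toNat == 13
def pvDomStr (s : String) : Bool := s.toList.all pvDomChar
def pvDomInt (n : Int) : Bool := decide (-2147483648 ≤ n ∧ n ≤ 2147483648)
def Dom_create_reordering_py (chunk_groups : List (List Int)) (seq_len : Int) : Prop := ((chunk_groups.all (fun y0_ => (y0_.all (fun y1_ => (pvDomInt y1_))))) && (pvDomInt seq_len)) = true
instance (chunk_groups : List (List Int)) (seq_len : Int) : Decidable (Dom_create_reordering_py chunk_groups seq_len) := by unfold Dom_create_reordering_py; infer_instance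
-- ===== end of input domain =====

-- B replaces A's set-difference-over-the-full-range plus sort with gap enumeration:
-- sort the distinct in-range mapped positions and emit the unmapped tail as whole
-- ranges between consecutive mapped positions (alternative, not claimed faster).

-- ===== PORT A =====
def create_reordering_py (chunk_groups : List (List Int)) (seq_len : Int) : List Int :=
  let reordering := chunk_groups.foldl (fun acc group => acc ++ group) []
  let unmapped : PySem.Set Int :=
    PySem.Set.diff (PySem.Set.ofList (PySem.List.pyRange 0 seq_len 1)) (PySem.Set.ofList reordering)
  reordering ++ PySem.List.sorted unmapped (fun x => x)

-- ===== PORT B =====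
def create_reordering_py_alt (chunk_groups : List (List Int)) (seq_len : Int) : List Int :=
  let reordering := chunk_groups.foldl (fun acc group => acc ++ group) []
  let hits := PySem.List.sorted
    (PySem.Set.ofList (reordering.filter (fun p => decide (0 ≤ p ∧ p < seq_len)))) (fun x => x)
  let st := hits.foldl (fun (st : List Int × Int) h =>
      (st.1 ++ PySem.List.pyRange st.2 h 1, h + 1)) (reordering, 0)
  st.1 ++ PySem.List.pyRange st.2 seq_len 1

-- ===== PRECONDITION & SPEC =====
def Spec_create_reordering_py (chunk_groups : List (List Int)) (seq_len : Int) (out : List Int) : Prop := out = create_reordering_py_alt chunk_groups seq_len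
instance (chunk_groups : List (List Int)) (seq_len : Int) (out : List Int) : Decidable (Spec_create_reordering_py chunk_groups seq_len out) := by unfold Spec_create_reordering_py; infer_instance

-- ===== CLAIM (what is proved, stated in full; the proofs are below) =====
def Claim_equal_create_reordering_py : Prop := ∀ (chunk_groups : List (List Int)) (seq_len : Int), Dom_create_reordering_py chunk_groups seq_len → Spec_create_reordering_py chunk_groups seq_len (create_reordering_py chunk_groups seq_len)

-- ===== LEMMAS AND PROOFS =====

-- gap enumeration over a strictly increasing list of in-range hits produces the
-- filter of the full range that drops exactly those hits
lemma pv_gaps (sl : Int) : ∀ (S : List Int) (acc : List Int) (prev : Int),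
    S.Pairwise (· < ·) → (∀ s ∈ S, prev ≤ s ∧ s < sl) →
    (let st := S.foldl (fun (st : List Int × Int) h =>
        (st.1 ++ PySem.List.pyRange st.2 h 1, h + 1)) (acc, prev)
     st.1 ++ PySem.List.pyRange st.2 sl 1)
    = acc ++ (PySem.List.pyRange prev sl 1).filter (fun x => !S.contains x) := by
  intro S
  induction S with
  | nil =>
    intro acc prev _ _
    simp
  | cons h S ih =>
    intro acc prev hpw hmem
    have hph : prev ≤ h := (hmem h (by simp)).1
    have hhsl : h < sl := (hmem h (by simp)).2
    have hS : ∀ s ∈ S, h + 1 ≤ s ∧ s < sl := by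
      intro s hs
      exact ⟨by have := (List.pairwise_cons.mp hpw).1 s hs; omega, (hmem s (by simp [hs])).2⟩
    simp only [List.foldl_cons]
    rw [ih (acc ++ PySem.List.pyRange prev h 1) (h + 1) (List.pairwise_cons.mp hpw).2 hS]
    rw [PySem.List.pyRange_one_append prev h sl hph (le_of_lt hhsl),
        PySem.List.pyRange_one_cons hhsl]
    rw [List.filter_append, List.filter_cons]
    have hhead : (!List.contains (h :: S) h) = false := by simp
    rw [hhead]
    have h1 : (PySem.List.pyRange prev h 1).filter (fun x => !List.contains (h :: S) x)
        = PySem.List.pyRange prev h 1 := by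
      apply List.filter_eq_self.mpr
      intro x hx
      have hb := PySem.List.mem_pyRange_one.mp hx
      have : x ∉ h :: S := by
        intro hc
        rcases List.mem_cons.mp hc with rfl | hc
        · omega
        · have := (hS x hc).1; omega
      simp [this]
    have h2 : (PySem.List.pyRange (h + 1) sl 1).filter (fun x => !List.contains (h :: S) x)
        = (PySem.List.pyRange (h + 1) sl 1).filter (fun x => !List.contains S x) := by
      apply List.filter_congr
      intro x hx
      have hb := PySem.List.mem_pyRange_one.mp hx
      have hne : x ≠ h := by omega
      simp [hne]
    rw [h1, h2]
    simp [List.append_assoc]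

-- the two programs agree on every input
lemma pv_main (chunk_groups : List (List Int)) (seq_len : Int) :
    create_reordering_py chunk_groups seq_len = create_reordering_py_alt chunk_groups seq_len := by
  unfold create_reordering_py create_reordering_py_alt
  simp only []
  rw [PySem.List.foldl_append_eq_flatten, List.nil_append]
  set flat := chunk_groups.flatten with hflat
  set hits := PySem.List.sorted
    (PySem.Set.ofList (flat.filter (fun p => decide (0 ≤ p ∧ p < seq_len)))) (fun x => x)
    with hhits
  have hpw : hits.Pairwise (· < ·) := PySem.List.sorted_ofList_pairwise_lt _
  have hmemhits : ∀ x, x ∈ hits ↔ (x ∈ flat ∧ 0 ≤ x ∧ x < seq_len) := by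
    intro x
    rw [hhits, PySem.List.mem_sorted, PySem.Set.mem_ofList, List.mem_filter]
    simp
  have hrange : ∀ s ∈ hits, (0 : Int) ≤ s ∧ s < seq_len := by
    intro s hs; exact ((hmemhits s).mp hs).2
  rw [pv_gaps seq_len hits flat 0 hpw hrange]
  congr 1
  -- A's sorted set-difference equals B's filtered range
  rw [PySem.Set.ofList_eq_self_of_nodup _ (PySem.List.nodup_pyRange_one 0 seq_len)]
  have hdiff : PySem.Set.diff (PySem.List.pyRange 0 seq_len 1) (PySem.Set.ofList flat)
      = (PySem.List.pyRange 0 seq_len 1).filter (fun x => !flat.contains x) := by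
    unfold PySem.Set.diff
    apply List.filter_congr
    intro x _
    by_cases hx : x ∈ flat
    · simp [hx, PySem.Set.mem_ofList]
    · simp [hx, PySem.Set.mem_ofList]
  rw [hdiff]
  have hpwf : ((PySem.List.pyRange 0 seq_len 1).filter (fun x => !flat.contains x)).Pairwise
      (fun a b => (a : Int) ≤ b) :=
    ((PySem.List.pairwise_lt_pyRange_one 0 seq_len).filter _).imp (fun h => le_of_lt h)
  rw [PySem.List.sorted_eq_self_of_pairwise _ _ hpwf]
  apply List.filter_congr
  intro x hx
  have hb := PySem.List.mem_pyRange_one.mp hx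
  by_cases hm : x ∈ flat
  · have : x ∈ hits := (hmemhits x).mpr ⟨hm, hb.1, hb.2⟩
    simp [hm, this]
  · have : x ∉ hits := fun hc => hm ((hmemhits x).mp hc).1
    simp [hm, this]

-- ===== VERDICT (by name: the statement is the Claim_ definition above) =====
theorem create_reordering_py_spec : Claim_equal_create_reordering_py := by
  intro chunk_groups seq_len _
  unfold Spec_create_reordering_py
  exact pv_main chunk_groups seq_len
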